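-- pv_equiv track=rewrite | github.com/Kasper1985/Badge | image_coverter.py | process_pixels
-- ===== SOURCE A (Python) =====
-- def process_pixels(pixels, depth):
--     """
--     Process pixel values to scale them to the specified depth in bits.
--
--     :param pixels: List of grayscale pixel values (0-255).
--     :param depth: Depth in bits (e.g., 1, 2, 4, 8).
--     :return: List of scaled pixel values as hex strings.
--     """
--     hex_data = []
--
--     # Calculate the number of levels based on the depth in bits
--     levels = 2 ** depth
--
--     # Scale each pixel value to the specified depth
--     scaled_pixels = [min(int(pixel / 256 * levels), levels - 1) for pixel in pixels]
--
--     # Pack scaled pixels into bytes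
--     pixels_per_byte = 8 // depth # Number of pixels that fit into one byte
--     for i in range(0, len(scaled_pixels), pixels_per_byte):
--         byte = 0
--         for j in range(pixels_per_byte):
--             if i + j < len(scaled_pixels):
--                 # Shift the pixel value to its position in the byte
--                 byte |= scaled_pixels[i + j] << (8 - depth * (j + 1))
--         hex_data.append(f"0x{byte:02X}")
--
--
--     return hex_data
-- ===== SOURCE B (Python) =====
-- def process_pixels(pixels, depth):
--     """Single streaming pass: accumulate each scaled pixel into a running byte
--     with shift-or, flushing (left-aligned to the high bits) every 8//depth pixels
--     and once more at the end for a trailing partial group."""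
--     levels = 2 ** depth
--     pixels_per_byte = 8 // depth
--     hex_data = []
--     byte = 0
--     count = 0
--     for pixel in pixels:
--         byte = (byte << depth) | min(int(pixel / 256 * levels), levels - 1)
--         count += 1
--         if count == pixels_per_byte:
--             hex_data.append(f"0x{byte << (8 - depth * count):02X}")
--             byte = 0
--             count = 0
--     if count:
--         hex_data.append(f"0x{byte << (8 - depth * count):02X}")
--     return hex_data
-- ===== Notes on version B (the rewrite author's own statement) =====
-- stated objective: alternative
-- what changed: Replaces A's two-phase packing (build the full scaled list, then an outer loop over chunk starts with an inner indexed loop that places each pixel by a per-position shift) with a single streaming fold that shift-or-accumulates each scaled pixel into a running byte and flushes a left-aligned byte every 8//depth pixels and once at the end.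
-- outside the precondition, e.g. on process_pixels([5], -1): A returns [], B raises ValueError
import Mathlib
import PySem

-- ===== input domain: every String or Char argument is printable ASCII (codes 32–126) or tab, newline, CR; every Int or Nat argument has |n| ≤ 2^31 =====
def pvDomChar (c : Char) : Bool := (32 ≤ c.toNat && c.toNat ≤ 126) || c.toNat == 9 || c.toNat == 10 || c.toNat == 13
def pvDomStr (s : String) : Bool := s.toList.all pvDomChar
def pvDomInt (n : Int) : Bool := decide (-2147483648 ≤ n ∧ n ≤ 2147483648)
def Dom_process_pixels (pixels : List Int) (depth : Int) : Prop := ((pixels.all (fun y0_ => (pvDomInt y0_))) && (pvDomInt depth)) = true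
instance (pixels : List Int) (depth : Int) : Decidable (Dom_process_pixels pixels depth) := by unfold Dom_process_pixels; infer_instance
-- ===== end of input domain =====

-- B replaces A's two-phase scale-then-chunk packing with one streaming fold that
-- shift-or-accumulates each scaled pixel and flushes a left-aligned byte every
-- 8//depth pixels (and once at the end); return values proved equal for depth 1..8.

-- f"0x{n:02X}" for an arbitrary Python int n (width 2 counts the '-' sign, so a
-- negative value, whose digits plus sign are already ≥ 2 characters, is never padded).
def pvHexDigit (d : Nat) : Char := ("0123456789ABCDEF".toList).getD d '0'

def pvHexChars (n : Nat) : List Char :=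
  if h : n < 16 then [pvHexDigit n]
  else pvHexChars (n / 16) ++ [pvHexDigit (n % 16)]
  decreasing_by exact Nat.div_lt_self (by omega) (by omega)

def pyHexByte (n : Int) : String :=
  if n < 0 then String.mk ('0' :: 'x' :: '-' :: pvHexChars (-n).toNat)
  else String.mk ('0' :: 'x' :: (if (pvHexChars n.toNat).length < 2 then '0' :: pvHexChars n.toNat else pvHexChars n.toNat))

-- min(int(pixel / 256 * levels), levels - 1): for |pixel| ≤ 2^31 and levels = 2^depth ≤ 2^8
-- the float products pixel/256 and ·*levels are exact powers-of-two scalings (≤ 2^39 ≪ 2^53),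
-- so int(pixel/256*levels) is exactly trunc-toward-zero of (pixel*levels)/256.
def pvScale (levels : Int) (pixel : Int) : Int :=
  min (PySem.Int.truncdiv (pixel * levels) 256) (levels - 1)

-- ===== PORT A =====
def process_pixels (pixels : List Int) (depth : Int) : List String :=
  let levels : Int := 2 ^ depth.toNat
  let scaled : List Int := pixels.map (fun pixel => pvScale levels pixel)
  let ppb : Int := PySem.Int.floordiv 8 depth
  (PySem.List.pyRange 0 (scaled.length : Int) ppb).foldl
    (fun hex_data i =>
      hex_data ++ [pyHexByte
        ((PySem.List.pyRange 0 ppb 1).foldl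
          (fun byte j =>
            if i + j < (scaled.length : Int) then
              PySem.Int.bor byte (PySem.List.pyGetD scaled (i + j) 0 <<< (8 - depth * (j + 1)).toNat)
            else byte) 0)])
    []

-- ===== PORT B =====
def process_pixels_alt (pixels : List Int) (depth : Int) : List String :=
  let levels : Int := 2 ^ depth.toNat
  let ppb : Int := PySem.Int.floordiv 8 depth
  let st := pixels.foldl
    (fun (st : List String × Int × Int) pixel =>
      let byte := PySem.Int.bor (st.2.1 <<< depth.toNat) (pvScale levels pixel)
      let count := st.2.2 + 1
      if count = ppb then
        (st.1 ++ [pyHexByte (byte <<< (8 - depth * count).toNat)], 0, 0)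
      else (st.1, byte, count))
    ([], 0, 0)
  if st.2.2 ≠ 0 then st.1 ++ [pyHexByte (st.2.1 <<< (8 - depth * st.2.2).toNat)] else st.1

-- ===== PRECONDITION & SPEC =====
-- Pre_ excludes depths outside 1..8: there A raises ZeroDivisionError (depth = 0) or
-- ValueError (depth ≥ 9), and for negative depth returns [] only by accident of an
-- empty negative-step range while its scaling step produces non-integer floats; B raises there.
def Pre_process_pixels (pixels : List Int) (depth : Int) : Prop := 1 ≤ depth ∧ depth ≤ 8
instance (pixels : List Int) (depth : Int) : Decidable (Pre_process_pixels pixels depth) := by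
  unfold Pre_process_pixels; infer_instance

def pvWitness_process_pixels : List Int × Int := ([0, 64, 128, 255], 2)

def Spec_process_pixels (pixels : List Int) (depth : Int) (out : List String) : Prop := out = process_pixels_alt pixels depth
instance (pixels : List Int) (depth : Int) (out : List String) : Decidable (Spec_process_pixels pixels depth out) := by unfold Spec_process_pixels; infer_instance

-- ===== CLAIM (what is proved, stated in full; the proofs are below) =====
def Claim_equal_process_pixels : Prop := ∀ (pixels : List Int) (depth : Int), Dom_process_pixels pixels depth → Pre_process_pixels pixels depth → Spec_process_pixels pixels depth (process_pixels pixels depth)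

-- ===== LEMMAS AND PROOFS =====

-- reference packing: packA dn c g b ors each element of g onto b, the element with
-- t remaining after it at shift dn*|t| + c (so element j of an m-list gets dn*(m-1-j)+c)
def packA (dn c : Nat) : List Int → Int → Int
  | [], b => b
  | s :: t, b => packA dn c t (PySem.Int.bor b (s <<< (dn * t.length + c)))

-- reference chunking: one formatted byte per group of k1+1 scaled pixels
def chunksRef (dn k1 : Nat) : List Int → List String
  | [] => []
  | s :: t =>
      pyHexByte (packA dn (8 - dn * (List.take (k1+1) (s :: t)).length) (List.take (k1+1) (s :: t)) 0)
        :: chunksRef dn k1 (List.drop k1 t)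
  termination_by l => l.length
  decreasing_by simp [List.length_drop]

lemma chunksRef_nil (dn k1 : Nat) : chunksRef dn k1 [] = [] := by simp [chunksRef]

-- Nat bit lemmas feeding the Int two's-complement or/shift distributivity
lemma natAndA (m x n : Nat) : ((m+1) * 2^n - 1) &&& (x * 2^n) = (m &&& x) * 2^n := by
  have hp1 : (1:Nat) ≤ 2^n := Nat.one_le_two_pow
  have h1 : (m+1) * 2^n - 1 = 2^n * m + (2^n - 1) := by
    have h2 : (m+1) * 2^n = 2^n * m + 2^n := by ring
    omega
  have hb : 2^n - 1 < 2^n := by omega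
  apply Nat.eq_of_testBit_eq
  intro i
  rw [Nat.testBit_and, h1, Nat.testBit_two_pow_mul_add m hb i,
      Nat.testBit_mul_two_pow, Nat.testBit_mul_two_pow, Nat.testBit_two_pow_sub_one]
  by_cases h : i < n
  · simp [h, Nat.not_le.mpr h]
  · simp [h, Nat.le_of_not_lt h, Nat.testBit_and]

lemma natAndB (m k n : Nat) : ((m+1) * 2^n - 1) &&& ((k+1) * 2^n - 1) = (m &&& k) * 2^n + (2^n - 1) := by
  have hp1 : (1:Nat) ≤ 2^n := Nat.one_le_two_pow
  have h1 : ∀ j : Nat, (j+1) * 2^n - 1 = 2^n * j + (2^n - 1) := by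
    intro j
    have h2 : (j+1) * 2^n = 2^n * j + 2^n := by ring
    omega
  have h3 : (m &&& k) * 2^n + (2^n - 1) = 2^n * (m &&& k) + (2^n - 1) := by ring_nf
  have hb : 2^n - 1 < 2^n := by omega
  apply Nat.eq_of_testBit_eq
  intro i
  rw [Nat.testBit_and, h1 m, h1 k, h3, Nat.testBit_two_pow_mul_add m hb i,
      Nat.testBit_two_pow_mul_add k hb i, Nat.testBit_two_pow_mul_add (m &&& k) hb i]
  by_cases h : i < n
  · simp [h]
  · simp [h, Nat.testBit_and]

-- Python | distributes over << (all ints, two's complement)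
lemma borL (a b : Int) (n : Nat) :
    PySem.Int.bor a b * ((2^n : Nat) : Int)
      = PySem.Int.bor (a * ((2^n : Nat) : Int)) (b * ((2^n : Nat) : Int)) := by
  have hp1 : (1:Nat) ≤ 2^n := Nat.one_le_two_pow
  have hpI : (0:Int) < ((2^n : Nat) : Int) := by exact_mod_cast Nat.pos_of_ne_zero (by omega)
  rcases (em (0 ≤ a)) with ha | ha <;> rcases (em (0 ≤ b)) with hb | hb
  · -- both nonnegative
    have ha' : 0 ≤ a * ((2^n : Nat) : Int) := mul_nonneg ha hpI.le
    have hb' : 0 ≤ b * ((2^n : Nat) : Int) := mul_nonneg hb hpI.le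
    simp only [PySem.Int.bor, if_pos ha, if_pos hb, if_pos ha', if_pos hb']
    rw [Int.toNat_mul ha (by positivity), Int.toNat_mul hb (by positivity), Int.toNat_natCast]
    have hor : (a.toNat ||| b.toNat) * 2^n = (a.toNat * 2^n) ||| (b.toNat * 2^n) := by
      have := @Nat.shiftLeft_or_distrib n a.toNat b.toNat
      simpa [Nat.shiftLeft_eq] using this
    rw [← hor]
    push_cast
    ring
  · -- a ≥ 0, b < 0
    have ha' : 0 ≤ a * ((2^n : Nat) : Int) := mul_nonneg ha hpI.le
    have hb0 : b < 0 := not_le.mp hb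
    have hb' : ¬ 0 ≤ b * ((2^n : Nat) : Int) := not_le.mpr (mul_neg_of_neg_of_pos hb0 hpI)
    simp only [PySem.Int.bor, if_pos ha, if_neg hb, if_pos ha', if_neg hb']
    set M := (-b-1).toNat with hM
    have hbM : b = -(M:Int) - 1 := by omega
    have hMP : 1 ≤ (M+1) * 2^n := Nat.one_le_iff_ne_zero.mpr (Nat.mul_ne_zero (by omega) (by omega))
    have h4 : -(b * ((2^n:Nat):Int)) - 1 = (((M+1) * 2^n - 1 : Nat) : Int) := by
      rw [hbM, Nat.cast_sub hMP]; push_cast; ring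
    have h5 : (-(b * ((2^n:Nat):Int)) - 1).toNat = (M+1) * 2^n - 1 := by
      rw [h4, Int.toNat_natCast]
    have h6 : (a * ((2^n:Nat):Int)).toNat = a.toNat * 2^n := by
      rw [Int.toNat_mul ha (by positivity), Int.toNat_natCast]
    rw [h5, h6, natAndA M a.toNat n]
    have hA : M &&& a.toNat ≤ M := Nat.and_le_left
    have hA2 : (M &&& a.toNat) * 2^n + 1 ≤ (M+1) * 2^n := by
      have h7 : (M &&& a.toNat) * 2^n ≤ M * 2^n := Nat.mul_le_mul_right _ hA
      have h8 : (M+1) * 2^n = M * 2^n + 2^n := by ring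
      omega
    rw [Nat.cast_sub hA, Nat.cast_sub (by omega : (M &&& a.toNat) * 2^n ≤ (M+1)*2^n - 1),
        Nat.cast_sub hMP]
    push_cast
    ring
  · -- a < 0, b ≥ 0
    have ha0 : a < 0 := not_le.mp ha
    have ha' : ¬ 0 ≤ a * ((2^n : Nat) : Int) := not_le.mpr (mul_neg_of_neg_of_pos ha0 hpI)
    have hb' : 0 ≤ b * ((2^n : Nat) : Int) := mul_nonneg hb hpI.le
    simp only [PySem.Int.bor, if_neg ha, if_pos hb, if_neg ha', if_pos hb']
    set M := (-a-1).toNat with hM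
    have haM : a = -(M:Int) - 1 := by omega
    have hMP : 1 ≤ (M+1) * 2^n := Nat.one_le_iff_ne_zero.mpr (Nat.mul_ne_zero (by omega) (by omega))
    have h4 : -(a * ((2^n:Nat):Int)) - 1 = (((M+1) * 2^n - 1 : Nat) : Int) := by
      rw [haM, Nat.cast_sub hMP]; push_cast; ring
    have h5 : (-(a * ((2^n:Nat):Int)) - 1).toNat = (M+1) * 2^n - 1 := by
      rw [h4, Int.toNat_natCast]
    have h6 : (b * ((2^n:Nat):Int)).toNat = b.toNat * 2^n := by
      rw [Int.toNat_mul hb (by positivity), Int.toNat_natCast]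
    rw [h5, h6, natAndA M b.toNat n]
    have hA : M &&& b.toNat ≤ M := Nat.and_le_left
    have hA2 : (M &&& b.toNat) * 2^n + 1 ≤ (M+1) * 2^n := by
      have h7 : (M &&& b.toNat) * 2^n ≤ M * 2^n := Nat.mul_le_mul_right _ hA
      have h8 : (M+1) * 2^n = M * 2^n + 2^n := by ring
      omega
    rw [Nat.cast_sub hA, Nat.cast_sub (by omega : (M &&& b.toNat) * 2^n ≤ (M+1)*2^n - 1),
        Nat.cast_sub hMP]
    push_cast
    ring
  · -- both negative
    have ha0 : a < 0 := not_le.mp ha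
    have hb0 : b < 0 := not_le.mp hb
    have ha' : ¬ 0 ≤ a * ((2^n : Nat) : Int) := not_le.mpr (mul_neg_of_neg_of_pos ha0 hpI)
    have hb' : ¬ 0 ≤ b * ((2^n : Nat) : Int) := not_le.mpr (mul_neg_of_neg_of_pos hb0 hpI)
    simp only [PySem.Int.bor, if_neg ha, if_neg hb, if_neg ha', if_neg hb']
    set M := (-a-1).toNat with hM
    set K := (-b-1).toNat with hK
    have haM : a = -(M:Int) - 1 := by omega
    have hbK : b = -(K:Int) - 1 := by omega
    have hMP : 1 ≤ (M+1) * 2^n := Nat.one_le_iff_ne_zero.mpr (Nat.mul_ne_zero (by omega) (by omega))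
    have hKP : 1 ≤ (K+1) * 2^n := Nat.one_le_iff_ne_zero.mpr (Nat.mul_ne_zero (by omega) (by omega))
    have h4a : (-(a * ((2^n:Nat):Int)) - 1).toNat = (M+1) * 2^n - 1 := by
      have : -(a * ((2^n:Nat):Int)) - 1 = (((M+1) * 2^n - 1 : Nat) : Int) := by
        rw [haM, Nat.cast_sub hMP]; push_cast; ring
      rw [this, Int.toNat_natCast]
    have h4b : (-(b * ((2^n:Nat):Int)) - 1).toNat = (K+1) * 2^n - 1 := by
      have : -(b * ((2^n:Nat):Int)) - 1 = (((K+1) * 2^n - 1 : Nat) : Int) := by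
        rw [hbK, Nat.cast_sub hKP]; push_cast; ring
      rw [this, Int.toNat_natCast]
    rw [h4a, h4b, natAndB M K n, Nat.cast_add, Nat.cast_sub hp1]
    push_cast
    ring

lemma bor_shl (a b : Int) (n : Nat) :
    PySem.Int.bor a b <<< n = PySem.Int.bor (a <<< n) (b <<< n) := by
  have h : ((2:Int))^n = ((2^n : Nat) : Int) := by push_cast; ring
  rw [Int.shiftLeft_eq, Int.shiftLeft_eq, Int.shiftLeft_eq, h, borL]

-- range(a, b, s) for 0 < s is empty when b ≤ a
lemma pyRange_pos_nil (a b s : Int) (hs : 0 < s) (hba : b ≤ a) :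
    PySem.List.pyRange a b s = [] := by
  rw [PySem.List.pyRange_of_pos a b hs, if_neg (by omega)]
  simp

-- range(a, b, s) for 0 < s, a < b starts with a
lemma pyRange_pos_cons (a b s : Int) (hs : 0 < s) (hab : a < b) :
    PySem.List.pyRange a b s = a :: PySem.List.pyRange (a+s) b s := by
  rw [PySem.List.pyRange_of_pos a b hs, PySem.List.pyRange_of_pos (a+s) b hs, if_pos hab]
  by_cases h : a + s < b
  · rw [if_pos h]
    have hd : (b - a + s - 1) / s = (b - (a+s) + s - 1) / s + 1 := by
      have he : b - a + s - 1 = (b - (a+s) + s - 1) + 1 * s := by ring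
      rw [he, Int.add_mul_ediv_right _ _ (by omega : s ≠ 0)]
    have hn2 : 0 ≤ (b - (a+s) + s - 1) / s := Int.ediv_nonneg (by omega) (by omega)
    have ht : ((b - a + s - 1) / s).toNat = ((b - (a+s) + s - 1) / s).toNat + 1 := by omega
    rw [ht, List.range_succ_eq_map]
    simp only [List.map_cons, List.map_map]
    congr 1
    · simp
    · apply List.map_congr_left
      intro k _
      simp only [Function.comp_apply, Nat.succ_eq_add_one]
      push_cast
      ring
  · rw [if_neg h]
    have h1 : (b - a + s - 1) / s = 1 := by
      have hle : 1 ≤ (b - a + s - 1) / s := by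
        rw [Int.le_ediv_iff_mul_le hs]; omega
      have hlt : (b - a + s - 1) / s < 2 := by
        rw [Int.ediv_lt_iff_lt_mul hs]; omega
      omega
    rw [h1]
    simp [List.range_one]

-- B's in-chunk fold, shifted, is the reference packing
lemma foldB_shl (dn : Nat) (g : List Int) (b : Int) (c : Nat) :
    (g.foldl (fun b s => PySem.Int.bor (b <<< dn) s) b) <<< c
      = packA dn c g (b <<< (dn * g.length + c)) := by
  induction g generalizing b with
  | nil => simp [packA]
  | cons s t ih =>
      have hlen : dn * (s::t).length + c = dn + (dn * t.length + c) := by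
        simp [List.length_cons, Nat.mul_succ]; ring
      rw [List.foldl_cons, ih]
      conv_rhs => rw [packA]
      congr 1
      rw [bor_shl]
      congr 1
      rw [hlen, Int.shiftLeft_add, Int.shiftLeft_add]
      rw [Int.shiftLeft_add]

-- A's guarded inner loop over j equals the reference packing of the chunk at offset i
lemma innerA (d : Int) (dn : Nat) (k : Int) (kn : Nat)
    (hd : d = (dn:Int)) (hk : k = (kn:Int)) (hdk : dn * kn ≤ 8)
    (scaled : List Int) (i : Nat) :
    ∀ (j0 : Nat) (b : Int),
    (PySem.List.pyRange (j0:Int) k 1).foldl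
      (fun byte j =>
        if (i:Int) + j < (scaled.length : Int) then
          PySem.Int.bor byte (PySem.List.pyGetD scaled ((i:Int) + j) 0 <<< (8 - d * (j + 1)).toNat)
        else byte) b
    = packA dn (8 - dn * ((scaled.drop i).take kn).length)
        ((scaled.drop (i + j0)).take (kn - j0)) b := by
  intro j0 b
  induction hfuel : kn - j0 generalizing j0 b with
  | zero =>
      have hj : kn ≤ j0 := by omega
      rw [PySem.List.pyRange_one_eq_nil (by exact_mod_cast hk ▸ (by exact_mod_cast hj : (kn:Int) ≤ (j0:Int)))]
      simp [packA]
  | succ n ih =>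
      have hj : j0 < kn := by omega
      have hjk : (j0:Int) < k := by rw [hk]; exact_mod_cast hj
      rw [PySem.List.pyRange_one_cons hjk, List.foldl_cons]
      by_cases hin : (i:Int) + (j0:Int) < (scaled.length : Int)
      · have hin' : i + j0 < scaled.length := by exact_mod_cast hin
        rw [if_pos hin]
        have hget : PySem.List.pyGetD scaled ((i:Int) + (j0:Int)) 0 = scaled[i + j0] := by
          rw [PySem.List.pyGetD_of_nonneg scaled 0 (by positivity)]
          have : ((i:Int) + (j0:Int)).toNat = i + j0 := by omega
          rw [this, List.getD_eq_getElem scaled 0 hin']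
        have hcast : ((j0:Int) + 1) = (((j0+1 : Nat)):Int) := by push_cast; ring
        rw [hget, hcast, ih (j0+1) _ (by omega)]
        have hdrop : scaled.drop (i + j0) = scaled[i + j0] :: scaled.drop (i + j0 + 1) :=
          List.drop_eq_getElem_cons hin'
        rw [hdrop, List.take_succ_cons, packA, show i + (j0 + 1) = i + j0 + 1 by omega]
        congr 2
        -- shift amounts agree
        have hm : ((scaled.drop i).take kn).length = min kn (scaled.length - i) := by
          simp [List.length_take, List.length_drop]
        have hT : ((scaled.drop (i + j0 + 1)).take n).length
            = min kn (scaled.length - i) - (j0 + 1) := by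
          simp [List.length_take, List.length_drop]
          omega
        rw [hm, hT]
        have hmub : dn * min kn (scaled.length - i) ≤ dn * kn :=
          Nat.mul_le_mul_left _ (by omega)
        have hjm : j0 + 1 ≤ min kn (scaled.length - i) := by omega
        have hjb : dn * (j0+1) ≤ dn * min kn (scaled.length - i) :=
          Nat.mul_le_mul_left _ hjm
        have hsub : dn * (min kn (scaled.length - i) - (j0+1))
            = dn * min kn (scaled.length - i) - dn * (j0+1) := Nat.mul_sub _ _ _
        have hci : d * (((j0+1 : Nat)) : Int) = ((dn * (j0+1) : Nat) : Int) := by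
          rw [hd]; push_cast; ring
        rw [hci, hsub]
        have h8 : dn * min kn (scaled.length - i) ≤ 8 := le_trans hmub hdk
        generalize hA : dn * min kn (scaled.length - i) = A at *
        generalize hB : dn * (j0+1) = B at *
        congr 1
        omega
      · rw [if_neg hin]
        have hin' : scaled.length ≤ i + j0 := by omega
        have hcast : ((j0:Int) + 1) = (((j0+1 : Nat)):Int) := by push_cast; ring
        rw [hcast, ih (j0+1) b (by omega)]
        rw [List.drop_eq_nil_of_le hin', List.drop_eq_nil_of_le (by omega : scaled.length ≤ i + (j0+1))]
        simp

-- A's outer loop over chunk starts equals the reference chunking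
lemma outerA (d : Int) (dn : Nat) (k : Int) (kn : Nat)
    (hd : d = (dn:Int)) (hk : k = (kn:Int)) (hkn : 1 ≤ kn) (hdk : dn * kn ≤ 8)
    (scaled : List Int) :
    ∀ (i : Nat) (hex : List String),
    (PySem.List.pyRange (i:Int) (scaled.length:Int) k).foldl
      (fun hex_data i =>
        hex_data ++ [pyHexByte
          ((PySem.List.pyRange 0 k 1).foldl
            (fun byte j =>
              if i + j < (scaled.length : Int) then
                PySem.Int.bor byte (PySem.List.pyGetD scaled (i + j) 0 <<< (8 - d * (j + 1)).toNat)
              else byte) 0)]) hex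
    = hex ++ chunksRef dn (kn - 1) (scaled.drop i) := by
  intro i hex
  induction hfuel : scaled.length - i using Nat.strong_induction_on generalizing i hex with
  | _ n ih =>
  have hkpos : (0:Int) < k := by rw [hk]; exact_mod_cast hkn
  by_cases hi : scaled.length ≤ i
  · rw [pyRange_pos_nil _ _ _ hkpos (by exact_mod_cast hi), List.drop_eq_nil_of_le hi]
    simp [chunksRef]
  · have hi' : i < scaled.length := Nat.lt_of_not_le hi
    rw [pyRange_pos_cons _ _ _ hkpos (by exact_mod_cast hi'), List.foldl_cons]
    have hinner := innerA d dn k kn hd hk hdk scaled i 0 0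
    simp only [Nat.cast_zero, Nat.add_zero, Nat.sub_zero] at hinner
    rw [hinner]
    have hcast2 : (i:Int) + k = ((i + kn : Nat) : Int) := by rw [hk]; push_cast; ring
    rw [hcast2, ih (scaled.length - (i+kn)) (by omega) (i+kn) _ rfl]
    cases hds : scaled.drop i with
    | nil =>
        exfalso
        have hlen := congrArg List.length hds
        simp [List.length_drop] at hlen
        omega
    | cons s t =>
        simp only [chunksRef, show kn - 1 + 1 = kn by omega]
        have hdt : List.drop (kn-1) t = List.drop (i + kn) scaled := by
          have h1 : List.drop kn (s :: t) = List.drop (kn-1) t := by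
            conv_lhs => rw [show kn = (kn-1)+1 by omega]
            exact List.drop_succ_cons
          rw [← h1, ← hds, List.drop_drop]
        rw [hdt, ← hds]
        simp

-- B's fold inside one chunk: no flush, count grows, byte shift-or-accumulates
lemma innerB (d : Int) (dn : Nat) (k : Int) :
    ∀ (g : List Int) (hex : List String) (b : Int) (t : Int), 0 ≤ t → t + g.length < k →
    g.foldl
      (fun (st : List String × Int × Int) (s : Int) =>
        if st.2.2 + 1 = k then
          (st.1 ++ [pyHexByte ((PySem.Int.bor (st.2.1 <<< dn) s) <<< (8 - d * (st.2.2 + 1)).toNat)], 0, 0)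
        else (st.1, PySem.Int.bor (st.2.1 <<< dn) s, st.2.2 + 1)) (hex, b, t)
    = (hex, g.foldl (fun b s => PySem.Int.bor (b <<< dn) s) b, t + g.length) := by
  intro g
  induction g with
  | nil => intro hex b t h0 hlt; simp
  | cons s g' ih =>
      intro hex b t h0 hlt
      simp only [List.length_cons] at hlt
      have hlt' : t + 1 + (g'.length : Int) < k := by push_cast at hlt ⊢; omega
      rw [List.foldl_cons]
      dsimp only
      rw [if_neg (by omega : ¬ (t + 1 = k))]
      rw [ih _ _ _ (by omega) hlt']
      simp only [List.foldl_cons, List.length_cons]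
      refine congrArg _ (congrArg _ ?_)
      push_cast
      ring

-- B's streaming loop plus final flush equals the reference chunking
lemma chunksB (d : Int) (dn : Nat) (k : Int) (kn : Nat)
    (hd : d = (dn:Int)) (hk : k = (kn:Int)) (hkn : 1 ≤ kn) (hdk : dn * kn ≤ 8) :
    ∀ (g : List Int) (hex : List String),
    (if (g.foldl
          (fun (st : List String × Int × Int) (s : Int) =>
            if st.2.2 + 1 = k then
              (st.1 ++ [pyHexByte ((PySem.Int.bor (st.2.1 <<< dn) s) <<< (8 - d * (st.2.2 + 1)).toNat)], 0, 0)
            else (st.1, PySem.Int.bor (st.2.1 <<< dn) s, st.2.2 + 1)) (hex, 0, 0)).2.2 ≠ 0 then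
       (g.foldl
          (fun (st : List String × Int × Int) (s : Int) =>
            if st.2.2 + 1 = k then
              (st.1 ++ [pyHexByte ((PySem.Int.bor (st.2.1 <<< dn) s) <<< (8 - d * (st.2.2 + 1)).toNat)], 0, 0)
            else (st.1, PySem.Int.bor (st.2.1 <<< dn) s, st.2.2 + 1)) (hex, 0, 0)).1
         ++ [pyHexByte ((g.foldl
          (fun (st : List String × Int × Int) (s : Int) =>
            if st.2.2 + 1 = k then
              (st.1 ++ [pyHexByte ((PySem.Int.bor (st.2.1 <<< dn) s) <<< (8 - d * (st.2.2 + 1)).toNat)], 0, 0)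
            else (st.1, PySem.Int.bor (st.2.1 <<< dn) s, st.2.2 + 1)) (hex, 0, 0)).2.1
            <<< (8 - d * (g.foldl
          (fun (st : List String × Int × Int) (s : Int) =>
            if st.2.2 + 1 = k then
              (st.1 ++ [pyHexByte ((PySem.Int.bor (st.2.1 <<< dn) s) <<< (8 - d * (st.2.2 + 1)).toNat)], 0, 0)
            else (st.1, PySem.Int.bor (st.2.1 <<< dn) s, st.2.2 + 1)) (hex, 0, 0)).2.2).toNat)]
     else
       (g.foldl
          (fun (st : List String × Int × Int) (s : Int) =>
            if st.2.2 + 1 = k then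
              (st.1 ++ [pyHexByte ((PySem.Int.bor (st.2.1 <<< dn) s) <<< (8 - d * (st.2.2 + 1)).toNat)], 0, 0)
            else (st.1, PySem.Int.bor (st.2.1 <<< dn) s, st.2.2 + 1)) (hex, 0, 0)).1)
    = hex ++ chunksRef dn (kn - 1) g := by
  intro g
  induction hfuel : g.length using Nat.strong_induction_on generalizing g with
  | _ n ih =>
  intro hex
  cases g with
  | nil => simp [chunksRef]
  | cons s0 t0 =>
  by_cases hlen : kn ≤ (s0 :: t0).length
  · -- a full chunk is consumed, flushed, and the loop continues
    set g : List Int := s0 :: t0 with hg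
    have hx : kn - 1 < g.length := by omega
    have htk : g.take kn = g.take (kn-1) ++ [g[kn-1]] := by
      conv_lhs => rw [show kn = (kn-1)+1 by omega]
      rw [List.take_succ, List.getElem?_eq_getElem hx]
      rfl
    have hsplit : g = (g.take (kn-1) ++ [g[kn-1]]) ++ g.drop kn := by
      conv_lhs => rw [← List.take_append_drop kn g]
      rw [htk]
    have hlu : (g.take (kn-1)).length = kn - 1 := by
      simp [List.length_take]; omega
    conv_lhs => rw [hsplit]
    rw [List.foldl_append, List.foldl_append]
    rw [innerB d dn k (g.take (kn-1)) hex 0 0 (by omega)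
        (by rw [hlu, hk]; push_cast; omega)]
    rw [hlu]
    simp only [List.foldl_cons, List.foldl_nil, zero_add]
    rw [if_pos (by rw [hk]; push_cast; omega : (((kn-1 : Nat):Int)) + 1 = k)]
    have hb : PySem.Int.bor ((List.foldl (fun b s => PySem.Int.bor (b <<< dn) s) 0 (g.take (kn-1))) <<< dn) g[kn-1]
        = List.foldl (fun b s => PySem.Int.bor (b <<< dn) s) 0 (g.take kn) := by
      rw [htk, List.foldl_append]
      simp
    rw [hb]
    have hc : (8 - d * ((((kn-1 : Nat)):Int) + 1)).toNat = 8 - dn * kn := by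
      have h1 : d * (((kn-1 : Nat):Int) + 1) = ((dn * kn : Nat) : Int) := by
        rw [hd]; push_cast; rw [show ((kn-1 : Nat):Int) = (kn:Int) - 1 by push_cast; omega]; ring
      rw [h1]; omega
    rw [hc, foldB_shl, Int.zero_shiftLeft]
    rw [ih (g.drop kn).length (by simp [List.length_drop]; omega) (g.drop kn) rfl (hex ++ _)]
    -- unfold the reference on the right
    conv_rhs => rw [hg]
    simp only [chunksRef, show kn - 1 + 1 = kn by omega]
    have hdt : List.drop kn g = List.drop (kn-1) t0 := by
      conv_lhs => rw [hg, show kn = (kn-1)+1 by omega]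
      rw [List.drop_succ_cons]
    rw [← hdt, ← hg]
    have hclen : (g.take kn).length = kn := by simp [List.length_take]; omega
    rw [hclen]
    simp
  · -- trailing partial chunk: everything is consumed, then flushed once
    set g : List Int := s0 :: t0 with hg
    have hlt : (0:Int) + g.length < k := by
      rw [hk]; push_cast; omega
    rw [innerB d dn k g hex 0 0 (by omega) hlt]
    dsimp only
    simp only [zero_add]
    rw [if_pos (by simp only [hg, List.length_cons]; push_cast; omega : ((g.length : Nat) : Int) ≠ 0)]
    have hdl8 : dn * g.length ≤ 8 := by
      have h1 : dn * g.length ≤ dn * kn := Nat.mul_le_mul_left _ (by omega : g.length ≤ kn)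
      omega
    have hc : (8 - d * ((g.length : Nat) : Int)).toNat = 8 - dn * g.length := by
      have h1 : d * ((g.length : Nat) : Int) = ((dn * g.length : Nat) : Int) := by
        rw [hd]; push_cast; ring
      rw [h1]; omega
    rw [hc, foldB_shl, Int.zero_shiftLeft]
    conv_rhs => rw [hg]
    simp only [chunksRef, show kn - 1 + 1 = kn by omega]
    have htg : List.take kn (s0 :: t0) = g := by
      rw [hg]; exact List.take_of_length_le (by rw [← hg]; omega)
    have hdt : List.drop (kn-1) t0 = [] :=
      List.drop_eq_nil_of_le (by have h2 := hlen; rw [hg] at h2; simp at h2; omega)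
    rw [htg, hdt]
    simp [chunksRef_nil]

theorem process_pixels_spec : Claim_equal_process_pixels := by
  intro pixels depth hdom hpre
  obtain ⟨hd1, hd8⟩ := hpre
  show process_pixels pixels depth = process_pixels_alt pixels depth
  have hfd : PySem.Int.floordiv 8 depth = 8 / depth :=
    PySem.Int.floordiv_eq_ediv_of_pos (by omega)
  have hkn1I : (1:Int) ≤ PySem.Int.floordiv 8 depth := by
    rw [hfd, Int.le_ediv_iff_mul_le (by omega)]; omega
  have hd : depth = ((depth.toNat : Nat) : Int) := by omega
  have hk : PySem.Int.floordiv 8 depth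
      = (((PySem.Int.floordiv 8 depth).toNat : Nat) : Int) := by omega
  have hkn1 : 1 ≤ (PySem.Int.floordiv 8 depth).toNat := by omega
  have hdk8 : depth * PySem.Int.floordiv 8 depth ≤ 8 := by
    rw [hfd]
    have h1 := Int.ediv_mul_le 8 (show depth ≠ 0 by omega)
    calc depth * (8 / depth) = 8 / depth * depth := by ring
    _ ≤ 8 := h1
  have hdkn : depth.toNat * (PySem.Int.floordiv 8 depth).toNat ≤ 8 := by
    have hcast : ((depth.toNat * (PySem.Int.floordiv 8 depth).toNat : Nat) : Int)
        = depth * PySem.Int.floordiv 8 depth := by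
      push_cast
      rw [← hd, ← hk]
    omega
  have HA := outerA depth depth.toNat (PySem.Int.floordiv 8 depth)
    (PySem.Int.floordiv 8 depth).toNat hd hk hkn1 hdkn
    (pixels.map (fun pixel => pvScale (2 ^ depth.toNat) pixel)) 0 []
  simp only [Nat.cast_zero, List.drop_zero, List.nil_append] at HA
  have HB := chunksB depth depth.toNat (PySem.Int.floordiv 8 depth)
    (PySem.Int.floordiv 8 depth).toNat hd hk hkn1 hdkn
    (pixels.map (fun pixel => pvScale (2 ^ depth.toNat) pixel)) []
  simp only [List.foldl_map, List.nil_append] at HB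
  simp only [process_pixels, process_pixels_alt]
  rw [HA, ← HB]
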